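-- pv_equiv track=rewrite | github.com/OpenBankProject/OBP-MCP | scripts/generate_glossary_index.py | normalize_term_id
-- ===== SOURCE A (Python) =====
-- def normalize_term_id(title: str) -> str:
--     """
--     Convert a glossary term title to a normalized ID.
--
--     Args:
--         title: The term title (e.g., "Account.account_id")
--
--     Returns:
--         Normalized ID (e.g., "account-account_id")
--     """
--     # Convert to lowercase and replace spaces and dots with hyphens
--     term_id = title.lower()
--     term_id = term_id.replace(".", "-")
--     term_id = term_id.replace(" ", "-")
--     term_id = term_id.replace("_", "-")
--     # Remove any non-alphanumeric characters except hyphens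
--     term_id = ''.join(c for c in term_id if c.isalnum() or c == '-')
--     # Remove consecutive hyphens
--     while '--' in term_id:
--         term_id = term_id.replace('--', '-')
--     # Remove leading/trailing hyphens
--     term_id = term_id.strip('-')
--     return term_id
-- ===== SOURCE B (Python) =====
-- def normalize_term_id(title: str) -> str:
--     """One left-to-right scan: keep alphanumerics, turn runs of separator
--     characters ('.', ' ', '_', '-') into a single inner hyphen, drop the rest."""
--     out = []
--     for c in title.lower():
--         if c.isalnum():
--             out.append(c)
--         elif c in '. _-':
--             if out and out[-1] != '-':
--                 out.append('-')
--     return ''.join(out).rstrip('-')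
-- ===== Notes on version B (the rewrite author's own statement) =====
-- stated objective: simpler
-- what changed: Replaces A's chain of replace calls, a filtering join, a while-loop that collapses repeated hyphens, and a final two-sided hyphen strip by one left-to-right scan that keeps alphanumerics and emits at most a single inner hyphen per run of separator characters, followed by removing one possible trailing hyphen.
import Mathlib
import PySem

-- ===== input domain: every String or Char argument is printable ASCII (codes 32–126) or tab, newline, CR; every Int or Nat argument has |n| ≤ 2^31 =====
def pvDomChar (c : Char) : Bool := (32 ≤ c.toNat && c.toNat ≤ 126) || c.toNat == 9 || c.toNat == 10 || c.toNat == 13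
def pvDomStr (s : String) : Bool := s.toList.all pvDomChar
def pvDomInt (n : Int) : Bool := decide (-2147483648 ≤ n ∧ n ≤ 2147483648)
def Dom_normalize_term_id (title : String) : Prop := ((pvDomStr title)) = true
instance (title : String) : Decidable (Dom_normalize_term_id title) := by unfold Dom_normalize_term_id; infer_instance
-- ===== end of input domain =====

-- B is one left-to-right scan instead of A's replace-chain + hyphen-collapse loop + strip ('simpler').

-- ===== PORT A =====
-- helper characterization of one pass of ''.replace('--','-'), needed for the
-- termination of the port of A's `while '--' in term_id:` loop
def pvR : List Char → List Char
  | [] => []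
  | [c] => [c]
  | c :: d :: t => if c = '-' ∧ d = '-' then '-' :: pvR t else c :: pvR (d :: t)

theorem pvR_go (fuel : Nat) : ∀ (l acc : List Char), l.length ≤ fuel →
    PySem.Chars.replace.go ['-', '-'] ['-'] fuel l acc = acc.reverse ++ pvR l := by
  induction fuel with
  | zero =>
    intro l acc h
    have : l = [] := List.eq_nil_of_length_eq_zero (Nat.le_zero.mp h)
    subst this
    simp [PySem.Chars.replace.go, pvR]
  | succ n ih =>
    intro l acc h
    match l with
    | [] => simp [PySem.Chars.replace.go, pvR]
    | [c] =>
      simp only [PySem.Chars.replace.go, List.isPrefixOf, pvR]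
      have : ¬ (('-' == c) = true ∧ False) := by simp
      simp [List.isPrefixOf]
      rw [ih [] (c :: acc) (by simp)]
      simp [pvR]
    | c :: d :: t =>
      by_cases hcd : c = '-' ∧ d = '-'
      · obtain ⟨hc, hd⟩ := hcd
        subst hc; subst hd
        simp only [PySem.Chars.replace.go]
        rw [if_pos (by simp [List.isPrefixOf])]
        simp only [List.length_cons] at h
        rw [show (['-', '-'].length) = 2 from rfl]
        simp only [List.drop_succ_cons, List.drop_zero]
        rw [ih t (['-'].reverse ++ acc) (by omega)]
        simp [pvR]
      · simp only [PySem.Chars.replace.go]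
        rw [if_neg (by simp [List.isPrefixOf]; intro h1 h2; exact hcd ⟨h1.symm, h2.symm⟩)]
        simp only [List.length_cons] at h
        rw [ih (d :: t) (c :: acc) (by simp only [List.length_cons] at *; omega)]
        simp [pvR, hcd]

theorem pvReplace₂_eq (l : List Char) :
    PySem.Chars.replace l ['-', '-'] ['-'] = pvR l := by
  rw [PySem.Chars.replace]
  rw [if_neg (by simp)]
  exact pvR_go l.length l [] (le_refl _)

theorem pvR_length_le (l : List Char) : (pvR l).length ≤ l.length := by
  induction l using pvR.induct with
  | case1 => simp [pvR]
  | case2 c => simp [pvR]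
  | case3 c d t h ih => simp only [pvR, if_pos h, List.length_cons]; omega
  | case4 c d t h ih => simp only [pvR, if_neg h, List.length_cons] at *; omega

theorem pvR_length_lt (l : List Char) (h : ['-', '-'] <:+: l) :
    (pvR l).length < l.length := by
  induction l using pvR.induct with
  | case1 => simp at h
  | case2 c => have := h.length_le; simp at this
  | case3 c d t hcd ih =>
    have := pvR_length_le t
    simp only [pvR, if_pos hcd, List.length_cons]; omega
  | case4 c d t hcd ih =>
    have h' : ['-', '-'] <:+: d :: t := by
      rcases (List.infix_cons_iff).mp h with hp | hi
      · exfalso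
        rcases List.cons_prefix_cons.mp hp with ⟨hc, hp2⟩
        rcases List.cons_prefix_cons.mp hp2 with ⟨hd, _⟩
        exact hcd ⟨hc.symm, hd.symm⟩
      · exact hi
    have := ih h'
    simp only [pvR, if_neg hcd, List.length_cons] at *; omega

-- port of:  while '--' in term_id: term_id = term_id.replace('--', '-')
def pvCollapse (s : List Char) : List Char :=
  if PySem.Chars.isIn ['-', '-'] s then pvCollapse (PySem.Chars.replace s ['-', '-'] ['-']) else s
termination_by s.length
decreasing_by
  rw [pvReplace₂_eq]
  exact pvR_length_lt s ((PySem.Chars.isIn_iff_infix _ _).mp (by assumption))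

def normalize_term_id (title : String) : String :=
  let t1 := PySem.Str.lower title
  let t2 := PySem.Str.replace t1 "." "-"
  let t3 := PySem.Str.replace t2 " " "-"
  let t4 := PySem.Str.replace t3 "_" "-"
  let t5 := String.ofList (t4.toList.filter (fun c => PySem.Chars.isalnum c || c == '-'))
  let t6 := String.ofList (pvCollapse t5.toList)
  String.ofList (PySem.Chars.stripChars t6.toList ['-'])

-- ===== PORT B =====
def normalize_term_id_alt (title : String) : String :=
  let out := (PySem.Str.lower title).toList.foldl
    (fun out c =>
      if PySem.Chars.isalnum c then out ++ [c]
      else if ['.', ' ', '_', '-'].contains c then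
        if !out.isEmpty && out.getLast? != some '-' then out ++ ['-'] else out
      else out) []
  -- ''.join(out).rstrip('-') ported by hand (exact): drop the trailing '-' characters
  String.ofList ((out.reverse.dropWhile (· == '-')).reverse)

-- ===== PRECONDITION & SPEC =====
def Spec_normalize_term_id (title : String) (out : String) : Prop := out = normalize_term_id_alt title
instance (title : String) (out : String) : Decidable (Spec_normalize_term_id title out) := by unfold Spec_normalize_term_id; infer_instance

-- ===== CLAIM (what is proved, stated in full; the proofs are below) =====
def Claim_equal_normalize_term_id : Prop := ∀ (title : String), Dom_normalize_term_id title → Spec_normalize_term_id title (normalize_term_id title)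

-- ===== LEMMAS AND PROOFS =====

-- ---- the squeeze (collapse runs of '-') normal form ----
def pvSqueeze : List Char → List Char
  | [] => []
  | [c] => [c]
  | c :: d :: t => if c = '-' ∧ d = '-' then pvSqueeze (d :: t) else c :: pvSqueeze (d :: t)

theorem pvSqueeze_ne_nil (v : List Char) (h : v ≠ []) : pvSqueeze v ≠ [] := by
  induction v using pvSqueeze.induct with
  | case1 => exact absurd rfl h
  | case2 c => simp [pvSqueeze]
  | case3 c d t hcd ih => simpa [pvSqueeze, if_pos hcd] using ih (by simp)
  | case4 c d t hcd ih => simp [pvSqueeze, if_neg hcd]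

theorem pvGetLast?_cons_of_ne_nil {α : Type} (a : α) (l : List α) (h : l ≠ []) :
    (a :: l).getLast? = l.getLast? := by
  cases l with
  | nil => exact absurd rfl h
  | cons b t => simp [List.getLast?_cons_cons]

theorem pvSqueeze_getLast? (v : List Char) : (pvSqueeze v).getLast? = v.getLast? := by
  induction v using pvSqueeze.induct with
  | case1 => rfl
  | case2 c => rfl
  | case3 c d t hcd ih => rw [pvSqueeze, if_pos hcd, ih, List.getLast?_cons_cons]
  | case4 c d t hcd ih =>
    rw [pvSqueeze, if_neg hcd,
      pvGetLast?_cons_of_ne_nil _ _ (pvSqueeze_ne_nil _ (by simp)), ih, List.getLast?_cons_cons]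

theorem pvSqueeze_head? (v : List Char) : (pvSqueeze v).head? = v.head? := by
  induction v using pvSqueeze.induct with
  | case1 => rfl
  | case2 c => rfl
  | case3 c d t hcd ih => rw [pvSqueeze, if_pos hcd, ih]; simp [hcd.1, hcd.2]
  | case4 c d t hcd ih => rw [pvSqueeze, if_neg hcd]; rfl

theorem pvSqueeze_cons (c : Char) (x : List Char) :
    pvSqueeze (c :: x) =
      if c = '-' ∧ (pvSqueeze x).head? = some '-' then pvSqueeze x else c :: pvSqueeze x := by
  cases x with
  | nil => simp [pvSqueeze]
  | cons d t => rw [pvSqueeze, pvSqueeze_head?]; simp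

theorem pvSqueeze_pvR (l : List Char) : pvSqueeze (pvR l) = pvSqueeze l := by
  induction l using pvR.induct with
  | case1 => rfl
  | case2 c => rfl
  | case3 c d t hcd ih =>
    obtain ⟨hc, hd⟩ := hcd; subst hc; subst hd
    have e1 : pvR ('-' :: '-' :: t) = '-' :: pvR t := by rw [pvR, if_pos ⟨rfl, rfl⟩]
    have e2 : pvSqueeze ('-' :: '-' :: t) = pvSqueeze ('-' :: t) := by
      rw [pvSqueeze, if_pos ⟨rfl, rfl⟩]
    rw [e1, e2, pvSqueeze_cons '-' (pvR t), ih, pvSqueeze_cons '-' t]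
  | case4 c d t hcd ih =>
    rw [pvR, if_neg hcd, pvSqueeze_cons c (pvR (d :: t)), ih, pvSqueeze_cons c (d :: t)]

theorem pvSqueeze_of_noDD (v : List Char) (h : ¬ (['-', '-'] <:+: v)) : pvSqueeze v = v := by
  induction v using pvSqueeze.induct with
  | case1 => rfl
  | case2 c => rfl
  | case3 c d t hcd ih =>
    exact absurd (List.IsPrefix.isInfix ⟨t, by simp [hcd.1, hcd.2]⟩) h
  | case4 c d t hcd ih =>
    rw [pvSqueeze, if_neg hcd, ih (fun h' => h (List.infix_cons h'))]

theorem pvCollapse_eq_pvSqueeze (s : List Char) : pvCollapse s = pvSqueeze s := by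
  by_cases h : PySem.Chars.isIn ['-', '-'] s = true
  · rw [pvCollapse, if_pos h, pvCollapse_eq_pvSqueeze _, pvReplace₂_eq, pvSqueeze_pvR]
  · rw [pvCollapse, if_neg h]
    exact (pvSqueeze_of_noDD s fun h' =>
      h ((PySem.Chars.isIn_iff_infix _ _).mpr h')).symm
termination_by s.length
decreasing_by
  rw [pvReplace₂_eq]
  exact pvR_length_lt s ((PySem.Chars.isIn_iff_infix _ _).mp h)

theorem pvSqueeze_snoc (v : List Char) (w : Char) :
    pvSqueeze (v ++ [w]) =
      if v.getLast? = some '-' ∧ w = '-' then pvSqueeze v else pvSqueeze v ++ [w] := by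
  induction v using pvSqueeze.induct with
  | case1 => simp [pvSqueeze]
  | case2 c =>
    simp only [List.singleton_append]
    rw [pvSqueeze_cons c [w]]
    have hw1 : pvSqueeze [w] = [w] := by simp [pvSqueeze]
    by_cases h : c = '-' ∧ w = '-'
    · obtain ⟨hc, hw⟩ := h; subst hc; subst hw
      rw [if_pos (by simp [hw1]), if_pos (by simp [List.getLast?_singleton])]
    · have hA : ¬(c = '-' ∧ (pvSqueeze [w]).head? = some '-') := by
        rw [hw1]; simp only [List.head?_cons, Option.some.injEq]; exact fun hh => h hh
      have hB : ¬(([c] : List Char).getLast? = some '-' ∧ w = '-') := by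
        simp only [List.getLast?_singleton, Option.some.injEq]; exact fun hh => h hh
      rw [if_neg hA, if_neg hB, hw1]
      simp [pvSqueeze]
  | case3 c d t hcd ih =>
    rw [List.cons_append, List.cons_append, pvSqueeze, if_pos hcd, ← List.cons_append, ih,
      List.getLast?_cons_cons]
    have e : pvSqueeze (c :: d :: t) = pvSqueeze (d :: t) := by rw [pvSqueeze, if_pos hcd]
    rw [e]
  | case4 c d t hcd ih =>
    rw [List.cons_append, List.cons_append, pvSqueeze, if_neg hcd, ← List.cons_append, ih,
      List.getLast?_cons_cons]
    have e : pvSqueeze (c :: d :: t) = c :: pvSqueeze (d :: t) := by rw [pvSqueeze, if_neg hcd]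
    rw [e]
    split_ifs <;> simp

-- ---- the single-character replaces are maps ----
theorem pvReplace₁_go (a b : Char) (fuel : Nat) : ∀ (l acc : List Char), l.length ≤ fuel →
    PySem.Chars.replace.go [a] [b] fuel l acc
      = acc.reverse ++ l.map (fun c => if c = a then b else c) := by
  induction fuel with
  | zero =>
    intro l acc h
    have : l = [] := List.eq_nil_of_length_eq_zero (Nat.le_zero.mp h)
    subst this
    simp [PySem.Chars.replace.go]
  | succ n ih =>
    intro l acc h
    match l with
    | [] => simp [PySem.Chars.replace.go]
    | c :: t =>
      by_cases hc : c = a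
      · simp only [PySem.Chars.replace.go]
        rw [if_pos (by simp [List.isPrefixOf, hc])]
        simp only [List.length_cons] at h
        rw [show (([a] : List Char).length) = 1 from rfl, List.drop_succ_cons, List.drop_zero]
        rw [ih t ([b].reverse ++ acc) (by omega)]
        simp [hc]
      · simp only [PySem.Chars.replace.go]
        rw [if_neg (by simp [List.isPrefixOf]; intro h'; exact hc h'.symm)]
        simp only [List.length_cons] at h
        rw [ih t (c :: acc) (by omega)]
        simp [hc]

theorem pvReplace₁_eq (l : List Char) (a b : Char) :
    PySem.Chars.replace l [a] [b] = l.map (fun c => if c = a then b else c) := by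
  rw [PySem.Chars.replace, if_neg (by simp)]
  exact pvReplace₁_go a b l.length l [] (le_refl _)

-- ---- A's replace-chain + filter is a filterMap ----
def pvH (c : Char) : Option Char :=
  if ['.', ' ', '_', '-'].contains c then some '-'
  else if PySem.Chars.isalnum c then some c else none

theorem pvChain_eq_filterMap (u : List Char) :
    ((((u.map (fun c => if c = '.' then '-' else c)).map
        (fun c => if c = ' ' then '-' else c)).map
        (fun c => if c = '_' then '-' else c)).filter
        (fun c => PySem.Chars.isalnum c || c == '-'))
      = u.filterMap pvH := by
  induction u with
  | nil => rfl
  | cons c t ih =>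
    simp only [List.map_cons, List.filter_cons, List.filterMap_cons]
    rw [ih]
    by_cases h1 : c = '.'
    · subst h1; rfl
    · by_cases h2 : c = ' '
      · subst h2; rfl
      · by_cases h3 : c = '_'
        · subst h3; rfl
        · by_cases h4 : c = '-'
          · subst h4; rfl
          · have hcont : ((['.', ' ', '_', '-'] : List Char).contains c) = false := by
              refine Bool.eq_false_iff.mpr fun hcc => ?_
              simp only [List.contains_cons, List.contains_nil, Bool.or_false,
                Bool.or_eq_true, beq_iff_eq] at hcc
              rcases hcc with h | h | h | h
              · exact h1 h
              · exact h2 h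
              · exact h3 h
              · exact h4 h
            have hH : pvH c = if PySem.Chars.isalnum c then some c else none := by
              rw [pvH, hcont]; rfl
            simp only [if_neg h1, if_neg h2, if_neg h3, hH]
            by_cases h5 : PySem.Chars.isalnum c = true
            · simp [h5]
            · simp [h5, h4]

-- ---- B's fold over the raw characters is a fold over the filterMap ----
def pvStep' (out : List Char) (c : Char) : List Char :=
  if c = '-' then
    if !out.isEmpty && out.getLast? != some '-' then out ++ ['-'] else out
  else out ++ [c]

theorem pvSepNotAlnum (c : Char) (h : (['.', ' ', '_', '-'].contains c) = true) :
    PySem.Chars.isalnum c = false := by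
  simp only [List.contains_cons, List.contains_nil, Bool.or_false, Bool.or_eq_true,
    beq_iff_eq] at h
  rcases h with h | h | h | h <;> subst h <;> decide

theorem pvFold_eq (u : List Char) : ∀ (acc : List Char),
    u.foldl (fun out c =>
      if PySem.Chars.isalnum c then out ++ [c]
      else if ['.', ' ', '_', '-'].contains c then
        if !out.isEmpty && out.getLast? != some '-' then out ++ ['-'] else out
      else out) acc
    = (u.filterMap pvH).foldl pvStep' acc := by
  induction u with
  | nil => intro acc; rfl
  | cons c t ih =>
    intro acc
    rw [List.foldl_cons]
    by_cases hs : ((['.', ' ', '_', '-'] : List Char).contains c) = true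
    · have hH : pvH c = some '-' := by rw [pvH, if_pos hs]
      have ha := pvSepNotAlnum c hs
      simp only [List.filterMap_cons, hH, List.foldl_cons]
      rw [ih]
      congr 1
      rw [if_neg (by simp [ha]), if_pos hs, pvStep', if_pos rfl]
    · have hH0 : pvH c = if PySem.Chars.isalnum c then some c else none := by
        rw [pvH, if_neg hs]
      by_cases ha : PySem.Chars.isalnum c = true
      · have hc : c ≠ '-' := by
          intro h; subst h; exact absurd ha (by decide)
        have hH : pvH c = some c := by rw [hH0, if_pos ha]
        simp only [List.filterMap_cons, hH, List.foldl_cons]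
        rw [ih]
        congr 1
        rw [if_pos ha, pvStep', if_neg hc]
      · have hH : pvH c = none := by rw [hH0, if_neg ha]
        simp only [List.filterMap_cons, hH]
        rw [ih]
        congr 1
        rw [if_neg (by simp [ha]), if_neg hs]

-- ---- left-strip helpers ----
theorem pvLstrip_snoc (x : List Char) (c : Char) :
    (x ++ [c]).dropWhile (· == '-')
      = if x.all (· == '-') then [c].dropWhile (· == '-')
        else x.dropWhile (· == '-') ++ [c] := by
  induction x with
  | nil => simp
  | cons a t ih =>
    by_cases ha : a = '-'
    · subst ha
      rw [List.cons_append, List.dropWhile_cons, if_pos (by simp)]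
      rw [ih]
      rw [show (('-' :: t).all (· == '-')) = (t.all (· == '-')) from by simp]
      rw [show List.dropWhile (· == '-') ('-' :: t) = List.dropWhile (· == '-') t from by
        rw [List.dropWhile_cons, if_pos (by simp)]]
    · rw [List.cons_append, List.dropWhile_cons, if_neg (by simp [ha])]
      rw [show ((a :: t).all (· == '-')) = false from by simp [ha]]
      simp only [Bool.false_eq_true, if_false]
      rw [List.dropWhile_cons, if_neg (by simp [ha])]
      simp

theorem pvLstrip_all (x : List Char) (h : x.all (· == '-') = true) :
    x.dropWhile (· == '-') = [] := by
  rw [List.dropWhile_eq_nil_iff]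
  intro a ha
  simpa using List.all_eq_true.mp h a ha

theorem pvLstrip_not_all (x : List Char) (h : ¬ x.all (· == '-') = true) :
    x.dropWhile (· == '-') ≠ [] ∧ (x.dropWhile (· == '-')).getLast? = x.getLast? := by
  induction x with
  | nil => simp at h
  | cons a t ih =>
    by_cases ha : a = '-'
    · subst ha
      simp only [List.all_cons] at h
      have ht : ¬ t.all (· == '-') = true := by simpa using h
      obtain ⟨h1, h2⟩ := ih ht
      refine ⟨by simpa [List.dropWhile_cons] using h1, ?_⟩
      rw [List.dropWhile_cons]
      simp only [beq_self_eq_true, if_pos]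
      rw [h2, pvGetLast?_cons_of_ne_nil]
      intro h'; subst h'; simp at ht
    · constructor <;> simp [List.dropWhile_cons, ha]

-- ---- the main loop invariant: B's fold equals left-strip of the squeeze ----
theorem pvFold_eq_lstrip_squeeze (v : List Char) :
    v.foldl pvStep' [] = (pvSqueeze v).dropWhile (· == '-') := by
  induction v using List.reverseRecOn with
  | nil => rfl
  | append_singleton v c ih =>
    rw [List.foldl_append, List.foldl_cons, List.foldl_nil, ih, pvSqueeze_snoc]
    by_cases hcond : v.getLast? = some '-' ∧ c = '-'
    · rw [if_pos hcond]
      by_cases hall : (pvSqueeze v).all (· == '-') = true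
      · rw [pvLstrip_all _ hall, hcond.2]
        simp [pvStep']
      · obtain ⟨h1, h2⟩ := pvLstrip_not_all _ hall
        rw [pvStep', if_pos hcond.2]
        rw [if_neg]
        simp only [Bool.and_eq_true, Bool.not_eq_true', List.isEmpty_eq_false_iff, bne_iff_ne,
          not_and]
        intro _
        simp [h2, pvSqueeze_getLast?, hcond.1]
    · rw [if_neg hcond, pvLstrip_snoc]
      by_cases hall : (pvSqueeze v).all (· == '-') = true
      · rw [if_pos hall, pvLstrip_all _ hall]
        by_cases hc : c = '-'
        · subst hc
          simp [pvStep']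
        · simp [pvStep', hc, List.dropWhile_cons]
      · rw [if_neg hall]
        obtain ⟨h1, h2⟩ := pvLstrip_not_all _ hall
        by_cases hc : c = '-'
        · subst hc
          have hv : v.getLast? ≠ some '-' := fun h => hcond ⟨h, rfl⟩
          rw [pvStep', if_pos rfl, if_pos]
          simp only [Bool.and_eq_true, Bool.not_eq_true', List.isEmpty_eq_false_iff, bne_iff_ne]
          exact ⟨h1, by rw [h2, pvSqueeze_getLast?]; exact hv⟩
        · simp [pvStep', hc]

-- ---- stripChars with '-' in terms of dropWhile (· == '-') ----
theorem pvStripChars_eq (x : List Char) :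
    PySem.Chars.stripChars x ['-']
      = ((x.dropWhile (· == '-')).reverse.dropWhile (· == '-')).reverse := by
  have hp : (fun c => (['-'] : List Char).contains c) = (fun c : Char => c == '-') := by
    funext c
    by_cases h : c = '-' <;> simp [h]
  rw [PySem.Chars.stripChars]
  simp only [hp]

-- ---- the assembled core statement over an arbitrary character list ----
theorem pvCore (u : List Char) :
    PySem.Chars.stripChars
        (pvCollapse ((((u.map (fun c => if c = '.' then '-' else c)).map
            (fun c => if c = ' ' then '-' else c)).map
            (fun c => if c = '_' then '-' else c)).filter
            (fun c => PySem.Chars.isalnum c || c == '-'))) ['-']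
      = (((u.foldl (fun out c =>
            if PySem.Chars.isalnum c then out ++ [c]
            else if ['.', ' ', '_', '-'].contains c then
              if !out.isEmpty && out.getLast? != some '-' then out ++ ['-'] else out
            else out) []).reverse.dropWhile (· == '-')).reverse) := by
  rw [pvChain_eq_filterMap, pvCollapse_eq_pvSqueeze, pvFold_eq, pvFold_eq_lstrip_squeeze,
    pvStripChars_eq]

-- ===== VERDICT (by name: the statement is the Claim_ definition above) =====
theorem normalize_term_id_spec : Claim_equal_normalize_term_id := by
  intro title _
  unfold Spec_normalize_term_id normalize_term_id normalize_term_id_alt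
  simp only [PySem.Str.toList_replace, String.toList_ofList]
  rw [show ("." : String).toList = ['.'] from rfl, show (" " : String).toList = [' '] from rfl,
    show ("_" : String).toList = ['_'] from rfl, show ("-" : String).toList = ['-'] from rfl]
  rw [pvReplace₁_eq, pvReplace₁_eq, pvReplace₁_eq]
  exact congrArg String.ofList (pvCore (PySem.Str.lower title).toList)
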